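-- pv_equiv track=rewrite | github.com/odylith/odylith | src/odylith/runtime/governance/operator_readout.py | _group_scope_nouns
-- ===== SOURCE A (Python) =====
-- from typing import Any, Mapping, Sequence
--
-- def _scope_nouns(scope_type: str) -> tuple[str, str]:
--     token = str(scope_type or "").strip().lower()
--     if token == "workstream":
--         return ("workstream", "workstreams")
--     if token == "component":
--         return ("component", "components")
--     if token == "diagram":
--         return ("diagram", "diagrams")
--     return ("item", "items")
--
-- def _group_scope_nouns(items: Sequence[Mapping[str, Any]]) -> tuple[str, str]:
--     scope_types = {
--         str(item.get("scope_type", "")).strip().lower()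
--         for item in items
--         if isinstance(item, Mapping) and str(item.get("scope_type", "")).strip()
--     }
--     if len(scope_types) == 1:
--         return _scope_nouns(next(iter(scope_types)))
--     return ("item", "items")
-- ===== SOURCE B (Python) =====
-- from typing import Any, Mapping, Sequence
--
--
-- def _scope_nouns(scope_type: str) -> tuple[str, str]:
--     token = str(scope_type or "").strip().lower()
--     if token == "workstream":
--         return ("workstream", "workstreams")
--     if token == "component":
--         return ("component", "components")
--     if token == "diagram":
--         return ("diagram", "diagrams")
--     return ("item", "items")
--
--
-- def _group_scope_nouns(items: Sequence[Mapping[str, Any]]) -> tuple[str, str]: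
--     # Single pass: remember the first scope token seen; bail out to the
--     # generic nouns the moment a different one appears.
--     candidate = None
--     for item in items:
--         if not isinstance(item, Mapping):
--             continue
--         raw = str(item.get("scope_type", "")).strip()
--         if not raw:
--             continue
--         token = raw.lower()
--         if candidate is None:
--             candidate = token
--         elif token != candidate:
--             return ("item", "items")
--     if candidate is None:
--         return ("item", "items")
--     return _scope_nouns(candidate)
-- ===== Notes on version B (the rewrite author's own statement) =====
-- stated objective: alternative
-- what changed: Replaces building the full set of normalized scope tokens and testing len==1 by a single pass that keeps one candidate token and returns ('item','items') immediately on the first mismatching token.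
import Mathlib
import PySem

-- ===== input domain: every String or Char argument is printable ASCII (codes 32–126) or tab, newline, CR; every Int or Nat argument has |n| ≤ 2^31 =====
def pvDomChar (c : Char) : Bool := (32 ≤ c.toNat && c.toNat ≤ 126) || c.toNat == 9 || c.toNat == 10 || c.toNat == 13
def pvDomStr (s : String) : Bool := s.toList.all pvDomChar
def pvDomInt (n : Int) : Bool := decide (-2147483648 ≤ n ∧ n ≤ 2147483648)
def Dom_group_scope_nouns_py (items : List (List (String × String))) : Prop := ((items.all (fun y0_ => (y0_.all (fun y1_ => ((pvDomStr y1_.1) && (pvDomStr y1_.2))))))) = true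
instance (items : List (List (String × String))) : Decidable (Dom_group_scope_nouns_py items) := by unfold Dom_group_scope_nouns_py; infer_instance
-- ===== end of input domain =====

-- B replaces the set comprehension + len==1 test by one pass holding a single
-- candidate token with an early exit on the first mismatch (objective: alternative).

-- ===== PORT A =====
-- shared module helper _scope_nouns (called by both Pythons)
def scope_nouns (scope_type : String) : String × String :=
  let token := PySem.Str.lower (PySem.Str.strip scope_type)
  if token = "workstream" then ("workstream", "workstreams")
  else if token = "component" then ("component", "components")
  else if token = "diagram" then ("diagram", "diagrams")
  else ("item", "items")

-- set comprehension = Set.ofList of the filtered, mapped list; isinstance(item, Mapping)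
-- is always true under the type convention (every item is a dict)
def group_scope_nouns_py (items : List (List (String × String))) : String × String :=
  let scope_types : PySem.Set String :=
    PySem.Set.ofList
      ((items.filter
          (fun item => !(PySem.Str.strip (PySem.Dict.getD (PySem.Dict.mk item) "scope_type" "") == ""))).map
        (fun item => PySem.Str.lower (PySem.Str.strip (PySem.Dict.getD (PySem.Dict.mk item) "scope_type" ""))))
  if PySem.Set.len scope_types = 1 then scope_nouns (scope_types.headD "")
  else ("item", "items")

-- ===== PORT B =====
def scopeLoop (cand : Option String) (items : List (List (String × String))) : String × String :=
  match items with
  | [] =>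
      match cand with
      | none => ("item", "items")
      | some c => scope_nouns c
  | item :: rest =>
      let raw := PySem.Str.strip (PySem.Dict.getD (PySem.Dict.mk item) "scope_type" "")
      if raw == "" then scopeLoop cand rest
      else
        let token := PySem.Str.lower raw
        match cand with
        | none => scopeLoop (some token) rest
        | some c => if token == c then scopeLoop cand rest else ("item", "items")

def group_scope_nouns_py_alt (items : List (List (String × String))) : String × String :=
  scopeLoop none items

-- ===== PRECONDITION & SPEC =====
def Spec_group_scope_nouns_py (items : List (List (String × String))) (out : String × String) : Prop := out = group_scope_nouns_py_alt items
instance (items : List (List (String × String))) (out : String × String) : Decidable (Spec_group_scope_nouns_py items out) := by unfold Spec_group_scope_nouns_py; infer_instance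

-- ===== CLAIM (what is proved, stated in full; the proofs are below) =====
def Claim_equal_group_scope_nouns_py : Prop := ∀ (items : List (List (String × String))), Dom_group_scope_nouns_py items → Spec_group_scope_nouns_py items (group_scope_nouns_py items)

-- ===== LEMMAS AND PROOFS =====

-- the token list the set comprehension ranges over
def tokList (items : List (List (String × String))) : List String :=
  (items.filter
      (fun item => !(PySem.Str.strip (PySem.Dict.getD (PySem.Dict.mk item) "scope_type" "") == ""))).map
    (fun item => PySem.Str.lower (PySem.Str.strip (PySem.Dict.getD (PySem.Dict.mk item) "scope_type" "")))

-- A's tail: dispatch on the finished set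
def outOf (s : List String) : String × String :=
  match s with
  | [c] => scope_nouns c
  | _ => ("item", "items")

theorem length_le_foldl_add (l : List String) :
    ∀ s : List String, s.length ≤ (l.foldl PySem.Set.add s).length := by
  induction l with
  | nil => intro s; simp
  | cons x t ih =>
      intro s
      refine le_trans ?_ (ih (PySem.Set.add s x))
      unfold PySem.Set.add
      split <;> simp

theorem tokList_cons (item : List (String × String)) (rest : List (List (String × String))) :
    tokList (item :: rest) =
      if PySem.Str.strip (PySem.Dict.getD (PySem.Dict.mk item) "scope_type" "") == "" then tokList rest
      else PySem.Str.lower (PySem.Str.strip (PySem.Dict.getD (PySem.Dict.mk item) "scope_type" "")) :: tokList rest := by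
  unfold tokList
  by_cases h : PySem.Str.strip (PySem.Dict.getD (PySem.Dict.mk item) "scope_type" "") == "" <;>
    simp [h]

theorem scopeLoop_some (items : List (List (String × String))) :
    ∀ c : String, scopeLoop (some c) items = outOf ((tokList items).foldl PySem.Set.add [c]) := by
  induction items with
  | nil => intro c; simp [scopeLoop, tokList, outOf]
  | cons item rest ih =>
      intro c
      rw [show scopeLoop (some c) (item :: rest) =
        (if PySem.Str.strip (PySem.Dict.getD (PySem.Dict.mk item) "scope_type" "") == "" then scopeLoop (some c) rest
         else if PySem.Str.lower (PySem.Str.strip (PySem.Dict.getD (PySem.Dict.mk item) "scope_type" "")) == c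
              then scopeLoop (some c) rest else ("item", "items")) from rfl,
        tokList_cons]
      by_cases hraw : PySem.Str.strip (PySem.Dict.getD (PySem.Dict.mk item) "scope_type" "") == ""
      · simp [hraw, ih]
      · simp only [hraw]
        set tk := PySem.Str.lower (PySem.Str.strip (PySem.Dict.getD (PySem.Dict.mk item) "scope_type" "")) with htk
        by_cases heq : tk == c
        · have : PySem.Set.add [c] tk = [c] := by
            rw [eq_of_beq heq]; simp [PySem.Set.add]
          simp [heq, List.foldl_cons, this, ih]
        · have hne : tk ≠ c := fun h => heq (by simp [h])
          have hadd : PySem.Set.add [c] tk = [c, tk] := by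
            simp [PySem.Set.add, hne]
          have hlen : 2 ≤ ((tokList rest).foldl PySem.Set.add [c, tk]).length := by
            simpa using length_le_foldl_add (tokList rest) [c, tk]
          simp only [heq, Bool.false_eq_true, if_false, List.foldl_cons]
          rw [hadd]
          rcases hS : (tokList rest).foldl PySem.Set.add [c, tk] with _ | ⟨a, _ | ⟨b, t⟩⟩
          · rw [hS] at hlen; simp at hlen
          · rw [hS] at hlen; simp at hlen
          · simp [outOf]

theorem scopeLoop_none (items : List (List (String × String))) :
    scopeLoop none items = outOf ((tokList items).foldl PySem.Set.add []) := by
  induction items with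
  | nil => simp [scopeLoop, tokList, outOf]
  | cons item rest ih =>
      rw [show scopeLoop none (item :: rest) =
        (if PySem.Str.strip (PySem.Dict.getD (PySem.Dict.mk item) "scope_type" "") == "" then scopeLoop none rest
         else scopeLoop
           (some (PySem.Str.lower (PySem.Str.strip (PySem.Dict.getD (PySem.Dict.mk item) "scope_type" "")))) rest)
        from rfl, tokList_cons]
      by_cases hraw : PySem.Str.strip (PySem.Dict.getD (PySem.Dict.mk item) "scope_type" "") == ""
      · simp [hraw, ih]
      · simp only [hraw]
        rw [scopeLoop_some]
        rfl

theorem outOf_eq_branch (s : List String) :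
    (if s.length = 1 then scope_nouns (s.headD "") else ("item", "items")) = outOf s := by
  rcases s with _ | ⟨a, _ | ⟨b, t⟩⟩ <;> simp [outOf]

-- ===== VERDICT (by name: the statement is the Claim_ definition above) =====
theorem group_scope_nouns_py_spec : Claim_equal_group_scope_nouns_py := by
  intro items _
  unfold Spec_group_scope_nouns_py group_scope_nouns_py group_scope_nouns_py_alt
  rw [scopeLoop_none]
  show (if PySem.Set.len (PySem.Set.ofList (tokList items)) = 1
        then scope_nouns ((PySem.Set.ofList (tokList items)).headD "")
        else ("item", "items")) = outOf ((tokList items).foldl PySem.Set.add [])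
  rw [PySem.Set.ofList_eq_foldl]
  simp only [PySem.Set.len, Nat.cast_eq_one]
  exact outOf_eq_branch _
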